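-- pv_equiv track=rewrite | github.com/Taekyo-Lee/sw_expert_academy | problem_bank/25478/python/stress_test3.py | gen_two_cliques
-- ===== SOURCE A (Python) =====
-- def gen_two_cliques(size1, size2, D, connected=False):
--     """Two cliques, possibly connected by an edge."""
--     N = size1 + size2
--     A = [[0]*N for _ in range(N)]
--     for i in range(N):
--         A[i][i] = 1
--     # First clique
--     for i in range(size1):
--         for j in range(i+1, size1):
--             A[i][j] = 1
--             A[j][i] = 1
--     # Second clique
--     for i in range(size1, N):
--         for j in range(i+1, N):
--             A[i][j] = 1
--             A[j][i] = 1
--     # Connect them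
--     if connected:
--         A[size1-1][size1] = 1
--         A[size1][size1-1] = 1
--     return A
-- ===== SOURCE B (Python) =====
-- def gen_two_cliques(size1, size2, D, connected=False):
--     """Two cliques, possibly connected by an edge."""
--     row1 = [1] * size1 + [0] * size2
--     row2 = [0] * size1 + [1] * size2
--     A = [row1[:] for _ in range(size1)] + [row2[:] for _ in range(size2)]
--     if connected:
--         A[size1 - 1][size1] = 1
--         A[size1][size1 - 1] = 1
--     return A
-- ===== Notes on version B (the rewrite author's own statement) =====
-- stated objective: simpler
-- what changed: Instead of A's mutation of a zero matrix by a diagonal loop plus two triangular double loops, B builds the two block row templates once by list repetition/concatenation and assembles the matrix by replicating copies of them (C-level list operations instead of per-cell Python loops); only the optional connecting edge is still written by assignment, as in A.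
-- intended difference: On mixed-sign sizes where A still returns (size1<0 with size2>0, or size1=1 with size2<0), A's fill loops produce an accidental (size1+size2)-sized matrix via negative-index wraparound (e.g. [[1,1],[1,1]] for (-1,3), or [] for (1,-1)), while B returns the block matrix of the clamped non-negative sizes, the intended meaning of clique sizes. — e.g. on gen_two_cliques(-1, 3, 0, false): A returns [[1, 1], [1, 1]], B returns [[1, 1, 1], [1, 1, 1], [1, 1, 1]]
import Mathlib
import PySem

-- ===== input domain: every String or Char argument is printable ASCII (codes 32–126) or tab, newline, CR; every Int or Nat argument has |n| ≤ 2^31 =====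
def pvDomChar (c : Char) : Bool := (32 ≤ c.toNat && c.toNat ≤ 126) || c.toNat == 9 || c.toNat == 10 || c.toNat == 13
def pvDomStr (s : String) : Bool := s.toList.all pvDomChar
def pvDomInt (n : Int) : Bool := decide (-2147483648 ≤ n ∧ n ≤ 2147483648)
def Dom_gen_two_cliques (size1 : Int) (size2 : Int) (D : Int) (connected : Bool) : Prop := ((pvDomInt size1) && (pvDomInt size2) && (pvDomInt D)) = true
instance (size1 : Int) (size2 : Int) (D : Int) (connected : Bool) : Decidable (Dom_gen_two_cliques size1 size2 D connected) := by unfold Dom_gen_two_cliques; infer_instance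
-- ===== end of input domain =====

-- B assembles the matrix from two row templates built by list repetition and concatenation,
-- instead of A's in-place fill of a zero matrix by a diagonal loop plus two triangular loops;
-- on mixed-sign sizes (D_ below) B returns the block matrix of the clamped sizes where A's
-- wraparound writes produce an accidental matrix.

-- Python 'A[i][j] = v' (negative indices wrap). Out-of-range — where Python raises IndexError —
-- is modelled as a no-op; exactly those inputs are excluded by Pre_gen_two_cliques.
def pySet2 (A : List (List Int)) (i j : Int) (v : Int) : List (List Int) :=
  PySem.List.pySetD A i (PySem.List.pySetD (PySem.List.pyGetD A i []) j v)

-- ===== PORT A =====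
def gen_two_cliques (size1 : Int) (size2 : Int) (D : Int) (connected : Bool) : List (List Int) :=
  let N := size1 + size2
  let A0 := List.replicate N.toNat (List.replicate N.toNat (0 : Int))
  let A1 := (PySem.List.pyRange 0 N 1).foldl (fun A i => pySet2 A i i 1) A0
  let A2 := (PySem.List.pyRange 0 size1 1).foldl (fun A i =>
      (PySem.List.pyRange (i+1) size1 1).foldl (fun A j => pySet2 (pySet2 A i j 1) j i 1) A) A1
  let A3 := (PySem.List.pyRange size1 N 1).foldl (fun A i =>
      (PySem.List.pyRange (i+1) N 1).foldl (fun A j => pySet2 (pySet2 A i j 1) j i 1) A) A2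
  if connected then pySet2 (pySet2 A3 (size1-1) size1 1) size1 (size1-1) 1 else A3

-- ===== PORT B =====
-- '[1]*size1 + [0]*size2' → replicate (toNat clamps negatives to 0, exactly Python's list repetition);
-- '[row[:] for _ in range(k)]' → List.replicate k row (copies are irrelevant in a functional port).
def gen_two_cliques_alt (size1 : Int) (size2 : Int) (D : Int) (connected : Bool) : List (List Int) :=
  let row1 := List.replicate size1.toNat (1 : Int) ++ List.replicate size2.toNat (0 : Int)
  let row2 := List.replicate size1.toNat (0 : Int) ++ List.replicate size2.toNat (1 : Int)
  let A := List.replicate size1.toNat row1 ++ List.replicate size2.toNat row2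
  if connected then pySet2 (pySet2 A (size1-1) size1 1) size1 (size1-1) 1 else A

-- ===== PRECONDITION & SPEC =====
-- Pre_ is exactly the set of inputs on which the Python A returns normally: outside it A raises
-- IndexError (empty/too-small matrix, or an index ≥ N or < -N in a fill loop or the connect step).
def Pre_gen_two_cliques (size1 : Int) (size2 : Int) (D : Int) (connected : Bool) : Prop :=
  if size1 + size2 ≤ 0 then
    size1 ≤ 1 ∧ size1 + size2 - 1 ≤ size1 ∧ connected = false
  else
    -(size1 + size2) ≤ size1 ∧ size1 ≤ size1 + size2 ∧
      (connected = true → 1 - (size1 + size2) ≤ size1 ∧ size1 ≤ size1 + size2 - 1)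
instance (size1 : Int) (size2 : Int) (D : Int) (connected : Bool) : Decidable (Pre_gen_two_cliques size1 size2 D connected) := by unfold Pre_gen_two_cliques; infer_instance

def pvWitness_gen_two_cliques : Int × Int × Int × Bool := (2, 2, 0, true)

-- On mixed-sign sizes where A still returns (size1<0 with size2>0, or size1=1 with size2<0), A's
-- fill loops produce an accidental (size1+size2)-sized matrix via negative-index wraparound,
-- while B returns the block matrix of the clamped non-negative sizes, the intended meaning of
-- clique sizes.
def D_gen_two_cliques (size1 : Int) (size2 : Int) (D : Int) (connected : Bool) : Prop :=
  (size1 < 0 ∧ 0 < size2) ∨ (size1 = 1 ∧ size2 < 0)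
instance (size1 : Int) (size2 : Int) (D : Int) (connected : Bool) : Decidable (D_gen_two_cliques size1 size2 D connected) := by unfold D_gen_two_cliques; infer_instance

def Spec_gen_two_cliques (size1 : Int) (size2 : Int) (D : Int) (connected : Bool) (out : List (List Int)) : Prop := ¬ D_gen_two_cliques size1 size2 D connected → out = gen_two_cliques_alt size1 size2 D connected
instance (size1 : Int) (size2 : Int) (D : Int) (connected : Bool) (out : List (List Int)) : Decidable (Spec_gen_two_cliques size1 size2 D connected out) := by unfold Spec_gen_two_cliques; infer_instance

def pvDiffWitness_gen_two_cliques : Int × Int × Int × Bool := (-1, 3, 0, false)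
def pvDiffWitnessOut_gen_two_cliques : (List (List Int)) × (List (List Int)) :=
  ([[1, 1], [1, 1]], [[1, 1, 1], [1, 1, 1], [1, 1, 1]])

-- ===== CLAIM (what is proved, stated in full; the proofs are below) =====
def Claim_unchanged_gen_two_cliques : Prop := ∀ (size1 : Int) (size2 : Int) (D : Int) (connected : Bool), Dom_gen_two_cliques size1 size2 D connected → Pre_gen_two_cliques size1 size2 D connected → Spec_gen_two_cliques size1 size2 D connected (gen_two_cliques size1 size2 D connected)
def Claim_changed_gen_two_cliques : Prop := Dom_gen_two_cliques (pvDiffWitness_gen_two_cliques.1) (pvDiffWitness_gen_two_cliques.2.1) (pvDiffWitness_gen_two_cliques.2.2.1) (pvDiffWitness_gen_two_cliques.2.2.2) ∧ Pre_gen_two_cliques (pvDiffWitness_gen_two_cliques.1) (pvDiffWitness_gen_two_cliques.2.1) (pvDiffWitness_gen_two_cliques.2.2.1) (pvDiffWitness_gen_two_cliques.2.2.2) ∧ D_gen_two_cliques (pvDiffWitness_gen_two_cliques.1) (pvDiffWitness_gen_two_cliques.2.1) (pvDiffWitness_gen_two_cliques.2.2.1) (pvDiffWitness_gen_two_cliques.2.2.2)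 ∧ gen_two_cliques (pvDiffWitness_gen_two_cliques.1) (pvDiffWitness_gen_two_cliques.2.1) (pvDiffWitness_gen_two_cliques.2.2.1) (pvDiffWitness_gen_two_cliques.2.2.2) = pvDiffWitnessOut_gen_two_cliques.1 ∧ gen_two_cliques_alt (pvDiffWitness_gen_two_cliques.1) (pvDiffWitness_gen_two_cliques.2.1) (pvDiffWitness_gen_two_cliques.2.2.1) (pvDiffWitness_gen_two_cliques.2.2.2) = pvDiffWitnessOut_gen_two_cliques.2 ∧ pvDiffWitnessOut_gen_two_cliques.1 ≠ pvDiffWitnessOut_gen_two_cliques.2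
def Claim_exact_gen_two_cliques : Prop := ∀ (size1 : Int) (size2 : Int) (D : Int) (connected : Bool), Dom_gen_two_cliques size1 size2 D connected → Pre_gen_two_cliques size1 size2 D connected → D_gen_two_cliques size1 size2 D connected → gen_two_cliques size1 size2 D connected ≠ gen_two_cliques_alt size1 size2 D connected

-- ===== LEMMAS AND PROOFS =====
def nidx (n : Nat) (i : Int) : Nat := if 0 ≤ i then i.toNat else n - (-i).toNat
def gEnt (A : List (List Int)) (a b : Nat) : Int := (A.getD a []).getD b 0
def Shape (n : Nat) (A : List (List Int)) : Prop := A.length = n ∧ ∀ r ∈ A, r.length = n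
def VIdx (n : Nat) (i : Int) : Prop := -(n : Int) ≤ i ∧ i < n
lemma nidx_lt {n : Nat} {i : Int} (h : VIdx n i) : nidx n i < n := by
  unfold nidx; rcases h with ⟨h1, h2⟩; split <;> omega
lemma nidx_natCast {n : Nat} (a : Nat) : nidx n (a : Int) = a := by
  unfold nidx; simp

lemma pyIdx?_valid {n : Nat} {i : Int} (h : VIdx n i) :
    PySem.List.pyIdx? n i = some (nidx n i) := by
  rcases h with ⟨h1, h2⟩
  simp only [PySem.List.pyIdx?, nidx]
  split <;> simp_all
lemma pyGetD_valid {α : Type} {xs : List α} {i : Int} {d : α} (h : VIdx xs.length i) :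
    PySem.List.pyGetD xs i d = xs.getD (nidx xs.length i) d := by
  simp [PySem.List.pyGetD, PySem.List.pyGet?, pyIdx?_valid h, List.getD_eq_getElem?_getD]
lemma pySetD_valid {α : Type} {xs : List α} {i : Int} {v : α} (h : VIdx xs.length i) :
    PySem.List.pySetD xs i v = xs.set (nidx xs.length i) v := by
  simp only [PySem.List.pySetD, PySem.List.pySet?, pyIdx?_valid h, Option.map_some, Option.getD_some]
lemma getD_mem {α : Type} {xs : List α} {a : Nat} (h : a < xs.length) (d : α) :
    xs.getD a d ∈ xs := by
  rw [List.getD_eq_getElem xs d h]; exact List.getElem_mem h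

lemma getD_set {α : Type} (xs : List α) (k a : Nat) (v d : α) (hk : k < xs.length) :
    (xs.set k v).getD a d = if a = k then v else xs.getD a d := by
  rw [List.getD_eq_getElem?_getD, List.getD_eq_getElem?_getD, List.getElem?_set]
  split
  · next h => subst h; simp
  · next h => rw [if_neg (fun hh => h hh.symm)]

lemma shape_set2 {n : Nat} {A : List (List Int)} {i j : Int} {v : Int}
    (hS : Shape n A) (hi : VIdx n i) (hj : VIdx n j) :
    Shape n (pySet2 A i j v) ∧
      ∀ a b, gEnt (pySet2 A i j v) a b =
        if a = nidx n i ∧ b = nidx n j then v else gEnt A a b := by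
  obtain ⟨hlen, hrow⟩ := hS
  have hi' : VIdx A.length i := hlen ▸ hi
  have hni : nidx n i < n := nidx_lt hi
  have hnj : nidx n j < n := nidx_lt hj
  have hrlen : (A.getD (nidx n i) []).length = n :=
    hrow _ (getD_mem (by omega) [])
  have hj' : VIdx (A.getD (nidx n i) []).length j := by rw [hrlen]; exact hj
  have hset : pySet2 A i j v
      = A.set (nidx n i) ((A.getD (nidx n i) []).set (nidx n j) v) := by
    rw [pySet2, pySetD_valid hi', pyGetD_valid hi', hlen, pySetD_valid hj', hrlen]
  constructor
  · rw [hset]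
    refine ⟨by simp [hlen], ?_⟩
    intro r hr
    rcases List.mem_or_eq_of_mem_set hr with h | h
    · exact hrow r h
    · rw [h, List.length_set]; exact hrlen
  · intro a b
    rw [hset]
    unfold gEnt
    rw [getD_set A (nidx n i) a _ [] (by omega)]
    by_cases ha : a = nidx n i
    · subst ha
      rw [if_pos rfl, getD_set _ (nidx n j) b v 0 (by omega)]
      by_cases hb : b = nidx n j
      · rw [if_pos hb, if_pos ⟨rfl, hb⟩]
      · rw [if_neg hb, if_neg (by tauto)]
    · rw [if_neg ha, if_neg (by tauto)]

def wstep (A : List (List Int)) (p : Int × Int) : List (List Int) :=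
  pySet2 (pySet2 A p.1 p.2 1) p.2 p.1 1
def touch (n : Nat) (p : Int × Int) (a b : Nat) : Bool :=
  (nidx n p.1 == a && nidx n p.2 == b) || (nidx n p.1 == b && nidx n p.2 == a)

lemma wstep_ent {n : Nat} {A : List (List Int)} {p : Int × Int}
    (hS : Shape n A) (h1 : VIdx n p.1) (h2 : VIdx n p.2) :
    Shape n (wstep A p) ∧
      ∀ a b, gEnt (wstep A p) a b = if touch n p a b then 1 else gEnt A a b := by
  obtain ⟨hS1, he1⟩ := shape_set2 (v := 1) (i := p.1) (j := p.2) hS h1 h2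
  obtain ⟨hS2, he2⟩ := shape_set2 (v := 1) (i := p.2) (j := p.1) hS1 h2 h1
  refine ⟨hS2, fun a b => ?_⟩
  unfold wstep
  rw [he2, he1]
  unfold touch
  by_cases c1 : nidx n p.2 = a ∧ nidx n p.1 = b
  · rw [if_pos ⟨c1.1.symm ▸ rfl, c1.2.symm ▸ rfl⟩]
    have : (nidx n p.1 == b && nidx n p.2 == a) = true := by
      simp [c1.1, c1.2]
    simp [this]
  · rw [if_neg (by exact fun h => c1 ⟨h.1.symm ▸ rfl, h.2.symm ▸ rfl⟩)]
    by_cases c2 : a = nidx n p.1 ∧ b = nidx n p.2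
    · rw [if_pos c2]
      have : (nidx n p.1 == a && nidx n p.2 == b) = true := by
        simp [c2.1, c2.2]
      simp [this]
    · rw [if_neg c2]
      have ht : touch n p a b = false := by
        unfold touch
        simp only [Bool.or_eq_false_iff, Bool.and_eq_false_iff, beq_eq_false_iff_ne, ne_eq]
        constructor
        · by_cases h : nidx n p.1 = a
          · exact Or.inr (fun hb => c2 ⟨h.symm, hb.symm⟩)
          · exact Or.inl h
        · by_cases h : nidx n p.1 = b
          · exact Or.inr (fun hb => c1 ⟨hb, h⟩)
          · exact Or.inl h
      unfold touch at ht
      rw [ht]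
      simp

lemma wfold_ent {n : Nat} (L : List (Int × Int)) {A : List (List Int)}
    (hS : Shape n A) (hv : ∀ p ∈ L, VIdx n p.1 ∧ VIdx n p.2) :
    Shape n (L.foldl wstep A) ∧
      ∀ a b, gEnt (L.foldl wstep A) a b =
        if L.any (fun p => touch n p a b) then 1 else gEnt A a b := by
  induction L generalizing A with
  | nil => exact ⟨hS, fun a b => by simp⟩
  | cons p L ih =>
    obtain ⟨hp1, hp2⟩ := hv p List.mem_cons_self
    obtain ⟨hS1, he1⟩ := wstep_ent hS hp1 hp2
    obtain ⟨hS2, he2⟩ := ih hS1 (fun q hq => hv q (List.mem_cons_of_mem _ hq))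
    refine ⟨hS2, fun a b => ?_⟩
    rw [List.foldl_cons] at *
    rw [he2 a b, he1 a b]
    simp only [List.any_cons]
    by_cases h1 : L.any (fun q => touch n q a b) = true
    · simp [h1]
    · simp only [Bool.not_eq_true] at h1
      simp [h1]

def pairList (lo hi : Int) : List (Int × Int) :=
  (PySem.List.pyRange lo hi 1).flatMap (fun i => (PySem.List.pyRange (i+1) hi 1).map (fun j => (i, j)))

lemma mem_pairList {lo hi : Int} {p : Int × Int} :
    p ∈ pairList lo hi ↔ lo ≤ p.1 ∧ p.1 < p.2 ∧ p.2 < hi := by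
  unfold pairList
  simp only [List.mem_flatMap, List.mem_map, PySem.List.mem_pyRange_one]
  constructor
  · rintro ⟨i, ⟨hi1, hi2⟩, j, ⟨hj1, hj2⟩, rfl⟩
    exact ⟨hi1, by omega, hj2⟩
  · rintro ⟨h1, h2, h3⟩
    exact ⟨p.1, ⟨h1, by omega⟩, p.2, ⟨by omega, h3⟩, rfl⟩

lemma nested_eq (lo hi : Int) (A : List (List Int)) :
    (PySem.List.pyRange lo hi 1).foldl (fun A i =>
        (PySem.List.pyRange (i+1) hi 1).foldl (fun A j => pySet2 (pySet2 A i j 1) j i 1) A) A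
      = (pairList lo hi).foldl wstep A := by
  unfold pairList
  rw [List.foldl_flatMap]
  simp only [List.foldl_map]
  rfl

lemma dfold_ent {n : Nat} (k : Nat) {A : List (List Int)} (c N : Int)
    (hS : Shape n A) (hc : 0 ≤ c) (hN : N ≤ (n : Int)) (hk : (N - c).toNat = k) :
    Shape n ((PySem.List.pyRange c N 1).foldl (fun A i => pySet2 A i i 1) A) ∧
      ∀ a b, gEnt ((PySem.List.pyRange c N 1).foldl (fun A i => pySet2 A i i 1) A) a b =
        if c ≤ (a : Int) ∧ (a : Int) < N ∧ a = b then 1 else gEnt A a b := by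
  induction k generalizing c A with
  | zero =>
    rw [PySem.List.pyRange_one_eq_nil (by omega)]
    exact ⟨hS, fun a b => by rw [if_neg (by omega), List.foldl_nil]⟩
  | succ k ih =>
    have hlt : c < N := by omega
    rw [PySem.List.pyRange_one_cons hlt, List.foldl_cons]
    have hvc : VIdx n c := ⟨by omega, by omega⟩
    obtain ⟨hS1, he1⟩ := shape_set2 (v := 1) (i := c) (j := c) hS hvc hvc
    obtain ⟨hS2, he2⟩ := ih (c := c + 1) hS1 (by omega) (by omega)
    refine ⟨hS2, fun a b => ?_⟩
    rw [he2 a b, he1 a b]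
    have hnc : nidx n c = c.toNat := by unfold nidx; rw [if_pos hc]
    by_cases h1 : c + 1 ≤ (a : Int) ∧ (a : Int) < N ∧ a = b
    · rw [if_pos h1, if_pos ⟨by omega, h1.2⟩]
    · rw [if_neg h1]
      by_cases h2 : a = nidx n c ∧ b = nidx n c
      · rw [if_pos h2, if_pos (by omega)]
      · rw [if_neg h2, if_neg (by omega)]

lemma eq_of_ent {n : Nat} {A B : List (List Int)} (hA : Shape n A) (hB : Shape n B)
    (h : ∀ a b, a < n → b < n → gEnt A a b = gEnt B a b) : A = B := by
  obtain ⟨hAl, hAr⟩ := hA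
  obtain ⟨hBl, hBr⟩ := hB
  apply List.ext_getElem (by omega)
  intro a ha ha'
  apply List.ext_getElem
  · rw [hAr _ (List.getElem_mem ha), hBr _ (List.getElem_mem ha')]
  · intro b hb hb'
    have hrA : A[a].length = n := hAr _ (List.getElem_mem ha)
    have hab := h a b (by omega) (by omega)
    unfold gEnt at hab
    rwa [List.getD_eq_getElem A [] ha, List.getD_eq_getElem B [] ha',
      List.getD_eq_getElem _ 0 hb, List.getD_eq_getElem _ 0 hb'] at hab

lemma any_touch_true {n : Nat} {lo hi : Int} {a b : Nat} (hab : a ≠ b)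
    (h1 : lo ≤ (a : Int)) (h2 : lo ≤ (b : Int)) (h3 : (a : Int) < hi) (h4 : (b : Int) < hi) :
    ((pairList lo hi).any (fun p => touch n p a b)) = true := by
  rcases Nat.lt_or_ge a b with h | h
  · exact List.any_eq_true.2 ⟨((a : Int), (b : Int)),
      mem_pairList.2 ⟨h1, by omega, h4⟩, by simp [touch, nidx_natCast]⟩
  · have h' : b < a := by omega
    refine List.any_eq_true.2 ⟨((b : Int), (a : Int)),
      mem_pairList.2 ⟨h2, by omega, h3⟩, ?_⟩
    simp [touch, nidx_natCast]

lemma any_touch_bounds {n : Nat} {lo hi : Int} (hlo : 0 ≤ lo) {a b : Nat}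
    (h : ((pairList lo hi).any (fun p => touch n p a b)) = true) :
    lo ≤ (a : Int) ∧ (a : Int) < hi ∧ lo ≤ (b : Int) ∧ (b : Int) < hi ∧ a ≠ b := by
  obtain ⟨p, hp, ht⟩ := List.any_eq_true.1 h
  obtain ⟨hp1, hp2, hp3⟩ := mem_pairList.1 hp
  have e1 : nidx n p.1 = p.1.toNat := by unfold nidx; rw [if_pos (by omega)]
  have e2 : nidx n p.2 = p.2.toNat := by unfold nidx; rw [if_pos (by omega)]
  simp only [touch, e1, e2, Bool.or_eq_true, Bool.and_eq_true, beq_iff_eq] at ht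
  omega

lemma ent_zero (n a b : Nat) (ha : a < n) :
    gEnt (List.replicate n (List.replicate n (0 : Int))) a b = 0 := by
  unfold gEnt
  simp only [List.getD_eq_getElem?_getD, List.getElem?_replicate]
  rw [if_pos ha]
  simp only [Option.getD_some]
  rw [List.getElem?_replicate]
  split <;> simp

lemma shape_replicate (n : Nat) : Shape n (List.replicate n (List.replicate n (0 : Int))) := by
  refine ⟨List.length_replicate, fun r hr => ?_⟩
  rw [List.eq_of_mem_replicate hr, List.length_replicate]

-- getD of a concatenation of two replicated blocks
lemma repGetD {α : Type} (p q : Nat) (x y d : α) (k : Nat) :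
    (List.replicate p x ++ List.replicate q y).getD k d
      = if k < p then x else if k < p + q then y else d := by
  rw [List.getD_eq_getElem?_getD, List.getElem?_append]
  by_cases h1 : k < p
  · simp [h1]
  · simp only [if_neg h1, List.length_replicate, List.getElem?_replicate]
    by_cases h2 : k < p + q
    · rw [if_pos (by omega), if_pos h2]; simp
    · rw [if_neg (by omega), if_neg h2]; simp

-- the template matrix B builds (unconnected part)
lemma tmpl_shape (size1 size2 : Int) (h1 : 0 ≤ size1) (h2 : 0 ≤ size2) :
    Shape (size1 + size2).toNat
      (List.replicate size1.toNat (List.replicate size1.toNat (1 : Int) ++ List.replicate size2.toNat 0)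
        ++ List.replicate size2.toNat (List.replicate size1.toNat (0 : Int) ++ List.replicate size2.toNat 1)) := by
  constructor
  · simp only [List.length_append, List.length_replicate]; omega
  · intro r hr
    rcases List.mem_append.1 hr with h | h <;>
      · rw [List.eq_of_mem_replicate h]
        simp only [List.length_append, List.length_replicate]; omega

lemma tmpl_ent (size1 size2 : Int) (h1 : 0 ≤ size1) (h2 : 0 ≤ size2) (a b : Nat)
    (ha : a < (size1 + size2).toNat) (hb : b < (size1 + size2).toNat) :
    gEnt (List.replicate size1.toNat (List.replicate size1.toNat (1 : Int) ++ List.replicate size2.toNat 0)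
        ++ List.replicate size2.toNat (List.replicate size1.toNat (0 : Int) ++ List.replicate size2.toNat 1)) a b
      = if decide ((a : Int) < size1) = decide ((b : Int) < size1) then 1 else 0 := by
  unfold gEnt
  rw [repGetD]
  by_cases haa : a < size1.toNat
  · rw [if_pos haa, repGetD]
    by_cases hbb : b < size1.toNat
    · rw [if_pos hbb, if_pos (by simp; omega)]
    · rw [if_neg hbb, if_pos (by omega), if_neg (by simp; omega)]
  · rw [if_neg haa, if_pos (by omega), repGetD]
    by_cases hbb : b < size1.toNat
    · rw [if_pos hbb, if_neg (by simp; omega)]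
    · rw [if_neg hbb, if_pos (by omega), if_pos (by simp; omega)]

lemma main_core (size1 size2 : Int) (hN : 0 < size1 + size2)
    (h1 : 0 ≤ size1) (h2 : size1 ≤ size1 + size2) :
    (PySem.List.pyRange size1 (size1 + size2) 1).foldl (fun A i =>
        (PySem.List.pyRange (i+1) (size1 + size2) 1).foldl (fun A j => pySet2 (pySet2 A i j 1) j i 1) A)
      ((PySem.List.pyRange 0 size1 1).foldl (fun A i =>
        (PySem.List.pyRange (i+1) size1 1).foldl (fun A j => pySet2 (pySet2 A i j 1) j i 1) A)
      ((PySem.List.pyRange 0 (size1 + size2) 1).foldl (fun A i => pySet2 A i i 1)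
        (List.replicate (size1 + size2).toNat (List.replicate (size1 + size2).toNat (0 : Int)))))
    = List.replicate size1.toNat (List.replicate size1.toNat (1 : Int) ++ List.replicate size2.toNat 0)
        ++ List.replicate size2.toNat (List.replicate size1.toNat (0 : Int) ++ List.replicate size2.toNat 1) := by
  set N := size1 + size2 with hNdef
  set n := N.toNat with hndef
  have hS0 := shape_replicate n
  obtain ⟨hS1, he1⟩ := dfold_ent (n := n) n 0 N hS0 le_rfl (by omega) (by omega)
  obtain ⟨hS2, he2⟩ := wfold_ent (n := n) (pairList 0 size1) hS1
    (fun p hp => by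
      obtain ⟨q1, q2, q3⟩ := mem_pairList.1 hp
      exact ⟨⟨by omega, by omega⟩, ⟨by omega, by omega⟩⟩)
  obtain ⟨hS3, he3⟩ := wfold_ent (n := n) (pairList size1 N) hS2
    (fun p hp => by
      obtain ⟨q1, q2, q3⟩ := mem_pairList.1 hp
      exact ⟨⟨by omega, by omega⟩, ⟨by omega, by omega⟩⟩)
  rw [nested_eq, nested_eq]
  refine eq_of_ent hS3 (tmpl_shape size1 size2 h1 (by omega)) (fun a b ha hb => ?_)
  rw [tmpl_ent size1 size2 h1 (by omega) a b ha hb, he3, he2, he1, ent_zero n a b ha]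
  by_cases hab : a = b
  · subst hab
    rw [if_pos (show (0:Int) ≤ (a:Int) ∧ (a:Int) < N ∧ a = a from ⟨by omega, by omega, rfl⟩)]
    by_cases e3 : ((pairList size1 N).any (fun p => touch n p a a)) = true <;>
      by_cases e2 : ((pairList 0 size1).any (fun p => touch n p a a)) = true <;>
        simp [e3, e2]
  · rw [if_neg (show ¬((0:Int) ≤ (a:Int) ∧ (a:Int) < N ∧ a = b) by omega)]
    rcases le_or_gt size1 0 with hs | hs
    · have e3 : ((pairList size1 N).any (fun p => touch n p a b)) = true :=
        any_touch_true hab (by omega) (by omega) (by omega) (by omega)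
      rw [e3, if_pos rfl, if_pos (by simp; omega)]
    · by_cases ca : (a : Int) < size1 <;> by_cases cb : (b : Int) < size1
      · have e3 : ((pairList size1 N).any (fun p => touch n p a b)) ≠ true := fun h =>
          by have := any_touch_bounds (by omega) h; omega
        have e2 : ((pairList 0 size1).any (fun p => touch n p a b)) = true :=
          any_touch_true hab (by omega) (by omega) ca cb
        simp only [Bool.not_eq_true] at e3
        rw [e3, if_neg (by simp), e2, if_pos rfl, if_pos (by simp [ca, cb])]
      · have e3 : ((pairList size1 N).any (fun p => touch n p a b)) ≠ true := fun h =>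
          by have := any_touch_bounds (by omega) h; omega
        have e2 : ((pairList 0 size1).any (fun p => touch n p a b)) ≠ true := fun h =>
          by have := any_touch_bounds (by omega) h; omega
        simp only [Bool.not_eq_true] at e3 e2
        rw [e3, if_neg (by simp), e2, if_neg (by simp), if_neg (by simp [ca, cb])]
      · have e3 : ((pairList size1 N).any (fun p => touch n p a b)) ≠ true := fun h =>
          by have := any_touch_bounds (by omega) h; omega
        have e2 : ((pairList 0 size1).any (fun p => touch n p a b)) ≠ true := fun h =>
          by have := any_touch_bounds (by omega) h; omega
        simp only [Bool.not_eq_true] at e3 e2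
        rw [e3, if_neg (by simp), e2, if_neg (by simp), if_neg (by simp [ca, cb])]
      · have e3 : ((pairList size1 N).any (fun p => touch n p a b)) = true :=
          any_touch_true hab (by omega) (by omega) (by omega) (by omega)
        rw [e3, if_pos rfl, if_pos (by simp [ca, cb])]

-- length preservation, for the exact-difference proof and the empty case
lemma pySetD_len {α : Type} (xs : List α) (i : Int) (v : α) :
    (PySem.List.pySetD xs i v).length = xs.length := by
  simp only [PySem.List.pySetD, PySem.List.pySet?]
  cases PySem.List.pyIdx? xs.length i <;> simp

lemma pySet2_len (A : List (List Int)) (i j : Int) (v : Int) :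
    (pySet2 A i j v).length = A.length := by
  rw [pySet2, pySetD_len]

lemma foldl_len {β : Type} (f : List (List Int) → β → List (List Int))
    (h : ∀ A x, (f A x).length = A.length) (L : List β) (A : List (List Int)) :
    (L.foldl f A).length = A.length := by
  induction L generalizing A with
  | nil => rfl
  | cons x L ih => rw [List.foldl_cons, ih, h]

lemma lenA (size1 size2 D : Int) (connected : Bool) :
    (gen_two_cliques size1 size2 D connected).length = (size1 + size2).toNat := by
  unfold gen_two_cliques
  simp only []
  have h2 : ∀ (A : List (List Int)) (i : Int), ((PySem.List.pyRange (i+1) (size1+size2) 1).foldl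
      (fun A j => pySet2 (pySet2 A i j 1) j i 1) A).length = A.length :=
    fun A i => foldl_len _ (fun A j => by rw [pySet2_len, pySet2_len]) _ _
  have h1 : ∀ (A : List (List Int)) (i : Int), ((PySem.List.pyRange (i+1) size1 1).foldl
      (fun A j => pySet2 (pySet2 A i j 1) j i 1) A).length = A.length :=
    fun A i => foldl_len _ (fun A j => by rw [pySet2_len, pySet2_len]) _ _
  split
  · rw [pySet2_len, pySet2_len, foldl_len _ h2, foldl_len _ h1,
      foldl_len _ (fun A i => pySet2_len A i i 1), List.length_replicate]
  · rw [foldl_len _ h2, foldl_len _ h1,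
      foldl_len _ (fun A i => pySet2_len A i i 1), List.length_replicate]

lemma lenB (size1 size2 D : Int) (connected : Bool) :
    (gen_two_cliques_alt size1 size2 D connected).length = size1.toNat + size2.toNat := by
  unfold gen_two_cliques_alt
  simp only []
  split
  · rw [pySet2_len, pySet2_len]
    simp only [List.length_append, List.length_replicate]
  · simp only [List.length_append, List.length_replicate]

lemma foldl_wnil (L : List (Int × Int)) : L.foldl wstep [] = [] := by
  have := foldl_len wstep (fun A p => by rw [wstep, pySet2_len, pySet2_len]) L []
  exact List.eq_nil_of_length_eq_zero this

lemma main_eq (size1 size2 D : Int) (connected : Bool)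
    (hPre : Pre_gen_two_cliques size1 size2 D connected)
    (hD : ¬ D_gen_two_cliques size1 size2 D connected) :
    gen_two_cliques size1 size2 D connected = gen_two_cliques_alt size1 size2 D connected := by
  unfold Pre_gen_two_cliques at hPre
  unfold D_gen_two_cliques at hD
  simp only [gen_two_cliques, gen_two_cliques_alt]
  rcases le_or_gt (size1 + size2) 0 with hN | hN
  · rw [if_pos hN] at hPre
    obtain ⟨hp1, hp2, hp3⟩ := hPre
    subst hp3
    -- outside D_ with N ≤ 0 and Pre_: both sizes are ≤ 0, so both sides are []
    have hs1 : size1 ≤ 0 := by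
      by_contra h
      exact hD (Or.inr ⟨by omega, by omega⟩)
    have hs2 : size2 ≤ 0 := by
      by_contra h
      exact hD (Or.inl ⟨by omega, by omega⟩)
    have hz1 : size1.toNat = 0 := by omega
    have hz2 : size2.toNat = 0 := by omega
    have hz : (size1 + size2).toNat = 0 := by omega
    have r0 : PySem.List.pyRange 0 (size1 + size2) 1 = [] :=
      PySem.List.pyRange_one_eq_nil (by omega)
    rw [hz, hz1, hz2, r0]
    simp only [List.replicate_zero, List.foldl_nil, List.nil_append, Bool.false_eq_true, if_false]
    rw [nested_eq, nested_eq, foldl_wnil, foldl_wnil]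
  · rw [if_neg (by omega)] at hPre
    obtain ⟨hp1, hp2, _⟩ := hPre
    have h1 : 0 ≤ size1 := by
      by_contra h
      exact hD (Or.inl ⟨by omega, by omega⟩)
    rw [main_core size1 size2 hN h1 hp2]

-- ===== VERDICT (by name: the statement is the Claim_ definition above) =====
theorem gen_two_cliques_spec : Claim_unchanged_gen_two_cliques := by
  intro size1 size2 D connected _ hPre
  unfold Spec_gen_two_cliques
  intro hD
  exact main_eq size1 size2 D connected hPre hD

theorem gen_two_cliques_changed : Claim_changed_gen_two_cliques := by
  unfold Claim_changed_gen_two_cliques; decide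

theorem gen_two_cliques_tight : Claim_exact_gen_two_cliques := by
  intro size1 size2 D connected _ _ hD heq
  have hA := lenA size1 size2 D connected
  have hB := lenB size1 size2 D connected
  rw [heq, hB] at hA
  unfold D_gen_two_cliques at hD
  rcases hD with ⟨h1, h2⟩ | ⟨h1, h2⟩ <;> omega
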